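-- pv_equiv track=rewrite | github.com/rybickibartek/sentione | split_sentence.py | cutAfterVerbs
-- ===== SOURCE A (Python) =====
-- def cutAfterVerbs(sentence, verbsCount):
--     # cięcie kandydatów na zdania proste, którzy zawierają więcej niż jeden czasownik na zdania proste
--     sentences = [[]]
--     cuts = 0
--     for (word, pos) in sentence:
--         sentences[-1].append((word, pos))
--         if pos == 'verb' and cuts < verbsCount - 1:
--             sentences.append([])
--             cuts += 1
--
--     if sentences[-1] == []:
--         sentences = sentences[:-1]
--     return sentences
-- ===== SOURCE B (Python) =====
-- def cutAfterVerbs(sentence, verbsCount):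
--     # Repeatedly slice off the prefix ending at the next verb, at most verbsCount-1 times.
--     limit = max(verbsCount - 1, 0)
--     groups = []
--     rest = sentence
--     while limit > 0:
--         idx = next((i for i, (_, pos) in enumerate(rest) if pos == 'verb'), None)
--         if idx is None:
--             break
--         groups.append(rest[:idx + 1])
--         rest = rest[idx + 1:]
--         limit -= 1
--     if rest:
--         groups.append(rest)
--     return groups
-- ===== Notes on version B (the rewrite author's own statement) =====
-- stated objective: alternative
-- what changed: A makes one pass appending each word to the last group of a growing group list and trimming a trailing empty group; B instead repeatedly finds the next verb and slices the sentence into prefix/rest at most verbsCount-1 times, never creating an empty group.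
import Mathlib
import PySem

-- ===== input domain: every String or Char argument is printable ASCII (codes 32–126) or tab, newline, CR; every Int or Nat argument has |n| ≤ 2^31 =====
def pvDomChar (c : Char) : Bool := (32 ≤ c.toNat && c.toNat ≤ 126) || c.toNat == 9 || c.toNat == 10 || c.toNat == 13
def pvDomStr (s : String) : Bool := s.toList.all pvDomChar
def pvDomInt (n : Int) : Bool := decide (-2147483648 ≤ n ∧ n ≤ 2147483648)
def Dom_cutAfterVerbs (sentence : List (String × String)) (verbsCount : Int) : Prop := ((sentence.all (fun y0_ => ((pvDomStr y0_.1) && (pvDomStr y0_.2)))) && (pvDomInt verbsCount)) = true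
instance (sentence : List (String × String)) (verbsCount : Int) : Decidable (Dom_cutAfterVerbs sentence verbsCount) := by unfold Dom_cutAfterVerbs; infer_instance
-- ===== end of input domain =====

-- B re-implements A by repeated find-next-verb-and-slice instead of A's append-to-last-group pass; same cost, alternative decomposition.

-- ===== PORT A =====
-- sentences[-1].append(x): append x to the last group (never called on [] here; sentences starts as [[]])
def pvAppendLast (ss : List (List (String × String))) (x : String × String) : List (List (String × String)) :=
  match ss with
  | [] => []
  | [g] => [g ++ [x]]
  | g :: rest => g :: pvAppendLast rest x

def cutAfterVerbs (sentence : List (String × String)) (verbsCount : Int) : List (List (String × String)) :=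
  let st := sentence.foldl
    (fun (st : List (List (String × String)) × Int) wp =>
      let sentences := pvAppendLast st.1 wp
      if wp.2 == "verb" && decide (st.2 < verbsCount - 1) then
        (sentences ++ [[]], st.2 + 1)
      else
        (sentences, st.2))
    ([[]], 0)
  if PySem.List.pyGet? st.1 (-1) = some [] then PySem.List.slice st.1 none (some (-1)) else st.1

-- ===== PORT B =====
-- the while-loop of Source B: fuel = limit (an Int ≥ 0 in Source B, decremented once per iteration)
def pvBLoop (rest : List (String × String)) (k : Nat) (groups : List (List (String × String))) :
    List (List (String × String)) × List (String × String) :=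
  match k with
  | 0 => (groups, rest)
  | Nat.succ k' =>
    match rest.findIdx? (fun wp => wp.2 == "verb") with
    | none => (groups, rest)
    | some i =>
        pvBLoop (PySem.List.slice rest (some ((i : Int) + 1)) none) k'
          (groups ++ [PySem.List.slice rest none (some ((i : Int) + 1))])

def cutAfterVerbs_alt (sentence : List (String × String)) (verbsCount : Int) : List (List (String × String)) :=
  let limit := max (verbsCount - 1) 0
  let st := pvBLoop sentence limit.toNat []
  if st.2 = [] then st.1 else st.1 ++ [st.2]

-- ===== PRECONDITION & SPEC =====
def Spec_cutAfterVerbs (sentence : List (String × String)) (verbsCount : Int) (out : List (List (String × String))) : Prop := out = cutAfterVerbs_alt sentence verbsCount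
instance (sentence : List (String × String)) (verbsCount : Int) (out : List (List (String × String))) : Decidable (Spec_cutAfterVerbs sentence verbsCount out) := by unfold Spec_cutAfterVerbs; infer_instance

-- ===== CLAIM (what is proved, stated in full; the proofs are below) =====
def Claim_equal_cutAfterVerbs : Prop := ∀ (sentence : List (String × String)) (verbsCount : Int), Dom_cutAfterVerbs sentence verbsCount → Spec_cutAfterVerbs sentence verbsCount (cutAfterVerbs sentence verbsCount)

-- ===== LEMMAS AND PROOFS =====

-- A's loop body, named for the proofs (definitionally equal to the lambda in the port)
def pvStepA (verbsCount : Int) (st : List (List (String × String)) × Int) (wp : String × String) :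
    List (List (String × String)) × Int :=
  if wp.2 == "verb" && decide (st.2 < verbsCount - 1) then
    (pvAppendLast st.1 wp ++ [[]], st.2 + 1)
  else
    (pvAppendLast st.1 wp, st.2)

-- functional characterisation of A's running state: current group g, remaining allowed cuts k
def pvBuildK (g : List (String × String)) (s : List (String × String)) (k : Nat) : List (List (String × String)) :=
  match s with
  | [] => [g]
  | wp :: rest =>
      if wp.2 == "verb" && decide (k ≠ 0) then (g ++ [wp]) :: pvBuildK [] rest (k - 1)
      else pvBuildK (g ++ [wp]) rest k

def pvTrim (ss : List (List (String × String))) : List (List (String × String)) :=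
  if ss.getLast? = some [] then ss.dropLast else ss

theorem pvAppendLast_append (G : List (List (String × String))) (g : List (String × String)) (x : String × String) :
    pvAppendLast (G ++ [g]) x = G ++ [g ++ [x]] := by
  induction G with
  | nil => rfl
  | cons a G ih =>
      cases G with
      | nil => simp [pvAppendLast]
      | cons b G' => simpa [pvAppendLast] using ih

theorem pvFold_eq (verbsCount : Int) (s : List (String × String)) :
    ∀ (G : List (List (String × String))) (g : List (String × String)) (c : Int),
    (s.foldl (pvStepA verbsCount) (G ++ [g], c)).1 = G ++ pvBuildK g s ((verbsCount - 1 - c).toNat) := by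
  induction s with
  | nil => intro G g c; simp [pvBuildK]
  | cons wp rest ih =>
      intro G g c
      rw [List.foldl_cons]
      by_cases hv : (wp.2 == "verb") = true
      · by_cases hc : c < verbsCount - 1
        · have hstep : pvStepA verbsCount (G ++ [g], c) wp = ((G ++ [g ++ [wp]]) ++ [[]], c + 1) := by
            simp [pvStepA, hv, hc, pvAppendLast_append]
          have hk : (verbsCount - 1 - c).toNat ≠ 0 := by omega
          have hk2 : (verbsCount - 1 - (c + 1)).toNat = (verbsCount - 1 - c).toNat - 1 := by omega
          rw [hstep, ih]
          conv_rhs => rw [pvBuildK]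
          simp [hv, hk, hk2]
        · have hstep : pvStepA verbsCount (G ++ [g], c) wp = (G ++ [g ++ [wp]], c) := by
            simp [pvStepA, hv, hc, pvAppendLast_append]
          have hk : (verbsCount - 1 - c).toNat = 0 := by omega
          rw [hstep, ih]
          conv_rhs => rw [pvBuildK]
          simp [hv, hk]
      · have hstep : pvStepA verbsCount (G ++ [g], c) wp = (G ++ [g ++ [wp]], c) := by
          simp [pvStepA, hv, pvAppendLast_append]
        rw [hstep, ih]
        conv_rhs => rw [pvBuildK]
        simp [hv]

theorem cutAfterVerbs_eq_trim (sentence : List (String × String)) (verbsCount : Int) :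
    cutAfterVerbs sentence verbsCount = pvTrim (pvBuildK [] sentence (verbsCount - 1).toNat) := by
  show (if PySem.List.pyGet? (List.foldl (pvStepA verbsCount) ([[]], 0) sentence).1 (-1) = some [] then
          PySem.List.slice (List.foldl (pvStepA verbsCount) ([[]], 0) sentence).1 none (some (-1))
        else (List.foldl (pvStepA verbsCount) ([[]], 0) sentence).1)
      = pvTrim (pvBuildK [] sentence (verbsCount - 1).toNat)
  have h := pvFold_eq verbsCount sentence [] [] 0
  simp only [List.nil_append, Int.sub_zero] at h
  rw [h, pvTrim, PySem.List.pyGet?_neg_one, PySem.List.slice_to_neg_one]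

theorem pvBuildK_zero (g s : List (String × String)) : pvBuildK g s 0 = [g ++ s] := by
  induction s generalizing g with
  | nil => simp [pvBuildK]
  | cons wp rest ih => simp [pvBuildK, ih]

theorem pvBuildK_no_verb (s : List (String × String))
    (h : s.findIdx? (fun wp => wp.2 == "verb") = none) (g : List (String × String)) (k : Nat) :
    pvBuildK g s k = [g ++ s] := by
  induction s generalizing g with
  | nil => simp [pvBuildK]
  | cons wp rest ih =>
      rw [List.findIdx?_cons] at h
      by_cases hv : (wp.2 == "verb") = true
      · simp [hv] at h
      · simp only [hv, if_neg, Bool.false_eq_true, not_false_iff] at h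
        simp only [Option.map_eq_none_iff] at h
        simp [pvBuildK, hv, ih h]

theorem pvBuildK_first_verb (s : List (String × String)) :
    ∀ (i : Nat), s.findIdx? (fun wp => wp.2 == "verb") = some i →
    ∀ (g : List (String × String)) (k : Nat),
    pvBuildK g s (k + 1) = (g ++ s.take (i + 1)) :: pvBuildK [] (s.drop (i + 1)) k := by
  induction s with
  | nil => intro i h; simp at h
  | cons wp rest ih =>
      intro i h g k
      rw [List.findIdx?_cons] at h
      by_cases hv : (wp.2 == "verb") = true
      · simp only [hv, if_pos, Option.some.injEq] at h
        subst h
        simp [pvBuildK, hv]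
      · simp only [hv, if_neg, Bool.false_eq_true, not_false_iff] at h
        rcases Option.map_eq_some_iff.mp h with ⟨j, hj, rfl⟩
        simp only [pvBuildK, hv, Bool.false_and, if_neg, Bool.false_eq_true, not_false_iff]
        rw [ih j hj (g ++ [wp]) k]
        simp [List.take_succ_cons, List.drop_succ_cons]

theorem pvBuildK_ne_nil (g s : List (String × String)) (k : Nat) : pvBuildK g s k ≠ [] := by
  induction s generalizing g k with
  | nil => simp [pvBuildK]
  | cons wp rest ih =>
      unfold pvBuildK
      split
      · simp
      · exact ih _ _

theorem pvTrim_cons (a : List (String × String)) (l : List (List (String × String))) (h : l ≠ []) :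
    pvTrim (a :: l) = a :: pvTrim l := by
  cases l with
  | nil => exact absurd rfl h
  | cons b l' =>
      unfold pvTrim
      rw [List.getLast?_cons_cons, List.dropLast_cons_of_ne_nil (by simp : b :: l' ≠ [])]
      split <;> rfl

theorem pvTrim_singleton (s : List (String × String)) :
    pvTrim [s] = if s = [] then [] else [s] := by
  unfold pvTrim
  by_cases h : s = [] <;> simp [h]

theorem pvBLoop_acc (k : Nat) : ∀ (s : List (String × String)) (G : List (List (String × String))),
    pvBLoop s k G = (G ++ (pvBLoop s k []).1, (pvBLoop s k []).2) := by
  induction k with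
  | zero => intro s G; simp [pvBLoop]
  | succ k ih =>
      intro s G
      unfold pvBLoop
      cases h : s.findIdx? (fun wp => wp.2 == "verb") with
      | none => simp
      | some i =>
          simp only
          rw [ih _ (G ++ _), ih _ ([] ++ _)]
          simp

theorem pvCore (k : Nat) : ∀ (s : List (String × String)),
    pvTrim (pvBuildK [] s k) =
      (pvBLoop s k []).1 ++ (if (pvBLoop s k []).2 = [] then [] else [(pvBLoop s k []).2]) := by
  induction k with
  | zero =>
      intro s
      rw [pvBuildK_zero]
      simp only [List.nil_append, pvBLoop]
      simp [pvTrim_singleton]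
  | succ k ih =>
      intro s
      cases h : s.findIdx? (fun wp => wp.2 == "verb") with
      | none =>
          rw [pvBuildK_no_verb s h [] (k + 1)]
          simp only [List.nil_append]
          conv_rhs => rw [pvBLoop]
          simp only [h]
          rw [pvTrim_singleton]
          split <;> simp
      | some i =>
          rw [pvBuildK_first_verb s i h [] k]
          rw [pvTrim_cons _ _ (pvBuildK_ne_nil _ _ _)]
          rw [ih (s.drop (i + 1))]
          conv_rhs => rw [pvBLoop]
          simp only [h]
          have hc : ((i : Int) + 1) = ((i + 1 : Nat) : Int) := by push_cast; ring
          rw [hc, PySem.List.slice_from_natCast, PySem.List.slice_to_natCast]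
          rw [pvBLoop_acc k (s.drop (i + 1)) ([] ++ [s.take (i + 1)])]
          simp

theorem cutAfterVerbs_alt_eq (sentence : List (String × String)) (verbsCount : Int) :
    cutAfterVerbs_alt sentence verbsCount =
      (pvBLoop sentence (verbsCount - 1).toNat []).1 ++
        (if (pvBLoop sentence (verbsCount - 1).toNat []).2 = [] then []
         else [(pvBLoop sentence (verbsCount - 1).toNat []).2]) := by
  have hm : (max (verbsCount - 1) 0).toNat = (verbsCount - 1).toNat := by omega
  show (if (pvBLoop sentence (max (verbsCount - 1) 0).toNat []).2 = [] then
          (pvBLoop sentence (max (verbsCount - 1) 0).toNat []).1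
        else (pvBLoop sentence (max (verbsCount - 1) 0).toNat []).1 ++
          [(pvBLoop sentence (max (verbsCount - 1) 0).toNat []).2]) = _
  rw [hm]
  generalize pvBLoop sentence (verbsCount - 1).toNat [] = st
  by_cases h : st.2 = [] <;> simp [h]

-- ===== VERDICT (by name: the statement is the Claim_ definition above) =====
theorem cutAfterVerbs_spec : Claim_equal_cutAfterVerbs := by
  intro sentence verbsCount _
  unfold Spec_cutAfterVerbs
  rw [cutAfterVerbs_eq_trim, cutAfterVerbs_alt_eq, pvCore ((verbsCount - 1).toNat) sentence]
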